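-- pv_equiv track=rewrite | github.com/mageshyt/leetcode-solutions | Array/python/740. Delete and Earn.py | deleteAndEarn
-- ===== SOURCE A (Python) =====
-- from typing import Counter
--
-- def deleteAndEarn(nums):
--
--     count_val=Counter(nums)
--     # after removing the duplicate values
--     nums=sorted(list(set(nums)))
--     # two keep track of our earns
--     earn_one=0
--     earn_two=0
--     for i in range(len(nums)):
--         current_amount=nums[i]*count_val[nums[i]] # current value * count
--         '''
--         ex: nums=[2,2,3,3,3,4]
--         here 2 occurs twice, so we can earn 2*2=4 points
--         same for 3, 3*3=9 points
--         '''
--         if i >0 and nums[i]==nums[i-1]+1: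
--             temp=earn_two
--             earn_two=max(current_amount+earn_one,earn_two)
--             earn_one=temp
--         else:
--             temp=earn_two
--             earn_two=current_amount+earn_two
--             earn_one=temp
--
--     return max(earn_one,earn_two)
-- ===== SOURCE B (Python) =====
-- from typing import Counter
--
-- def _rob_run(run, count_val):
--     # House-Robber DP on one run of consecutive values; first value always added.
--     a, b = 0, run[0] * count_val[run[0]]
--     for v in run[1:]:
--         a, b = b, max(v * count_val[v] + a, b)
--     return a, b
--
-- def deleteAndEarn(nums):
--     count_val = Counter(nums)
--     vals = sorted(count_val)
--     if not vals:
--         return 0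
--     # partition the sorted distinct values into maximal runs of consecutive integers
--     runs = []
--     cur = [vals[0]]
--     prev = vals[0]
--     for v in vals[1:]:
--         if v == prev + 1:
--             cur.append(v)
--         else:
--             runs.append(cur)
--             cur = [v]
--         prev = v
--     runs.append(cur)
--     # runs are independent: earlier runs contribute their final value, the last one the best pair
--     total = 0
--     for run in runs[:-1]:
--         total += _rob_run(run, count_val)[1]
--     a, b = _rob_run(runs[-1], count_val)
--     return total + max(a, b)
-- ===== Notes on version B (the rewrite author's own statement) =====
-- stated objective: alternative
-- what changed: B partitions the sorted distinct values into maximal runs of consecutive integers and computes a small rolling House-Robber DP per run, summing the runs, instead of A's single indexed scan over the sorted-unique list with a per-step adjacency (gap) check on rolling global accumulators.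
import Mathlib
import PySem

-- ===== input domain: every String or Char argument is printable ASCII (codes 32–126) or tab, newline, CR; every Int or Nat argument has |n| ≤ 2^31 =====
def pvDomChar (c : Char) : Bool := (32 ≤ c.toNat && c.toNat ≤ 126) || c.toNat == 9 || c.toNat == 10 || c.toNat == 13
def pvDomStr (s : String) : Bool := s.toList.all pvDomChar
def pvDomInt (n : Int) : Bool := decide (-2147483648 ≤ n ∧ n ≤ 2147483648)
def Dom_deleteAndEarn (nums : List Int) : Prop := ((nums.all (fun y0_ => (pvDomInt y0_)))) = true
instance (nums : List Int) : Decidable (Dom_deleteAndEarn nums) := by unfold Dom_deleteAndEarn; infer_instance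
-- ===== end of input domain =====

-- B replaces A's single indexed scan with its per-step gap test by an explicit partition of the
-- sorted distinct values into maximal consecutive runs, a small rolling House-Robber DP per run,
-- and a sum over runs (objective: alternative decomposition; same asymptotic cost).

-- ===== PORT A =====
def deleteAndEarn (nums : List Int) : Int :=
  let count_val := PySem.Dict.counter nums
  let nums2 := PySem.List.sorted (PySem.Set.ofList nums) (fun x => x) false
  let s := (PySem.List.pyRange 0 (nums2.length : Int) 1).foldl
    (fun (s : Int × Int) i =>
      let current := (PySem.List.pyGetD nums2 i 0) * count_val.getD (PySem.List.pyGetD nums2 i 0) 0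
      if 0 < i ∧ PySem.List.pyGetD nums2 i 0 = PySem.List.pyGetD nums2 (i - 1) 0 + 1 then
        (s.2, max (current + s.1) s.2)
      else
        (s.2, current + s.2))
    (0, 0)
  max s.1 s.2

-- ===== PORT B =====
-- House-Robber DP over one run of consecutive values (run[0] always contributes to the 2nd component)
def robRun (run : List Int) (count_val : PySem.Dict Int Int) : Int × Int :=
  (PySem.List.slice run (some 1) none).foldl
    (fun (s : Int × Int) v => (s.2, max (v * count_val.getD v 0 + s.1) s.2))
    (0, (PySem.List.pyGetD run 0 0) * count_val.getD (PySem.List.pyGetD run 0 0) 0)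

def deleteAndEarn_alt (nums : List Int) : Int :=
  let count_val := PySem.Dict.counter nums
  let vals := PySem.List.sorted count_val.keys (fun x => x) false
  match vals with
  | [] => 0
  | v0 :: rest =>
    let st := rest.foldl
      (fun (s : List (List Int) × List Int × Int) v =>
        if v = s.2.2 + 1 then (s.1, s.2.1 ++ [v], v) else (s.1 ++ [s.2.1], [v], v))
      ([], [v0], v0)
    let total := st.1.foldl (fun acc run => acc + (robRun run count_val).2) 0
    total + max (robRun st.2.1 count_val).1 (robRun st.2.1 count_val).2

-- ===== PRECONDITION & SPEC =====
def Spec_deleteAndEarn (nums : List Int) (out : Int) : Prop := out = deleteAndEarn_alt nums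
instance (nums : List Int) (out : Int) : Decidable (Spec_deleteAndEarn nums out) := by unfold Spec_deleteAndEarn; infer_instance

-- ===== CLAIM (what is proved, stated in full; the proofs are below) =====
def Claim_equal_deleteAndEarn : Prop := ∀ (nums : List Int), Dom_deleteAndEarn nums → Spec_deleteAndEarn nums (deleteAndEarn nums)

-- ===== LEMMAS AND PROOFS =====

def stepA (cnt : PySem.Dict Int Int) (prev : Int) : List Int → Int × Int → Int × Int
  | [], s => s
  | v :: t, s =>
    if v = prev + 1 then
      stepA cnt v t (s.2, max (v * cnt.getD v 0 + s.1) s.2)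
    else
      stepA cnt v t (s.2, v * cnt.getD v 0 + s.2)
lemma robRun_cons (x : Int) (t : List Int) (cnt : PySem.Dict Int Int) :
    robRun (x :: t) cnt =
      t.foldl (fun (s : Int × Int) v => (s.2, max (v * cnt.getD v 0 + s.1) s.2))
        (0, x * cnt.getD x 0) := by
  simp [robRun, PySem.List.slice_from (x :: t) (a := 1) (by norm_num), PySem.List.pyGetD]
lemma robRun_snoc (x : Int) (t : List Int) (v : Int) (cnt : PySem.Dict Int Int) :
    robRun (x :: (t ++ [v])) cnt =
      ((robRun (x :: t) cnt).2,
       max (v * cnt.getD v 0 + (robRun (x :: t) cnt).1) (robRun (x :: t) cnt).2) := by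
  simp [robRun_cons, List.foldl_append]

def runsTotal (cnt : PySem.Dict Int Int) (runs : List (List Int)) : Int :=
  runs.foldl (fun acc run => acc + (robRun run cnt).2) 0
lemma runsTotal_append_singleton (cnt : PySem.Dict Int Int) (runs : List (List Int)) (r : List Int) :
    runsTotal cnt (runs ++ [r]) = runsTotal cnt runs + (robRun r cnt).2 := by
  simp [runsTotal, List.foldl_append]
lemma robRun_singleton (v : Int) (cnt : PySem.Dict Int Int) :
    robRun [v] cnt = (0, v * cnt.getD v 0) := by
  simp [robRun_cons]
lemma main_inv (cnt : PySem.Dict Int Int) :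
    ∀ (d : List Int) (runs : List (List Int)) (x : Int) (t : List Int) (prev : Int),
      stepA cnt prev d
        (runsTotal cnt runs + (robRun (x :: t) cnt).1,
         runsTotal cnt runs + (robRun (x :: t) cnt).2) =
      (let st := d.foldl
          (fun (s : List (List Int) × List Int × Int) v =>
            if v = s.2.2 + 1 then (s.1, s.2.1 ++ [v], v) else (s.1 ++ [s.2.1], [v], v))
          (runs, x :: t, prev)
       (runsTotal cnt st.1 + (robRun st.2.1 cnt).1,
        runsTotal cnt st.1 + (robRun st.2.1 cnt).2)) := by
  intro d
  induction d with
  | nil => intro runs x t prev; simp [stepA]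
  | cons v d ih =>
    intro runs x t prev
    simp only [List.foldl_cons, stepA, List.cons_append]
    split_ifs with h
    · refine Eq.trans ?_ (ih runs x (t ++ [v]) v)
      congr 1
      rw [robRun_snoc]
      refine Prod.ext ?_ ?_ <;> dsimp
      · rw [show v * cnt.getD v 0 + (runsTotal cnt runs + (robRun (x :: t) cnt).1)
              = runsTotal cnt runs + (v * cnt.getD v 0 + (robRun (x :: t) cnt).1) by ring,
            ← max_add_add_left]
    · refine Eq.trans ?_ (ih (runs ++ [x :: t]) v [] v)
      congr 1
      rw [runsTotal_append_singleton, robRun_singleton]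
      refine Prod.ext ?_ ?_ <;> dsimp <;> ring

lemma A_index (cnt : PySem.Dict Int Int) (V : List Int) :
    ∀ (d : List Int) (k : Nat) (s : Int × Int),
      V.drop (k + 1) = d →
      (PySem.List.pyRange ((k + 1 : Nat) : Int) (V.length : Int) 1).foldl
        (fun (s : Int × Int) i =>
          let current := (PySem.List.pyGetD V i 0) * cnt.getD (PySem.List.pyGetD V i 0) 0
          if 0 < i ∧ PySem.List.pyGetD V i 0 = PySem.List.pyGetD V (i - 1) 0 + 1 then
            (s.2, max (current + s.1) s.2)
          else
            (s.2, current + s.2)) s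
      = stepA cnt (V.getD k 0) d s := by
  intro d
  induction d with
  | nil =>
    intro k s hd
    have hlen : V.length ≤ k + 1 := List.drop_eq_nil_iff.mp hd
    rw [PySem.List.pyRange_one_eq_nil (by exact_mod_cast hlen)]
    simp [stepA]
  | cons v d ih =>
    intro k s hd
    have hk : k + 1 < V.length := by
      by_contra hc
      rw [List.drop_eq_nil_iff.mpr (by omega)] at hd
      exact List.cons_ne_nil v d hd.symm
    have h1 := List.drop_eq_getElem_cons (l := V) (i := k + 1) hk
    rw [hd] at h1
    injection h1 with h2 h3
    have hv : V.getD (k + 1) 0 = v := by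
      simp [List.getD, List.getElem?_eq_getElem hk, ← h2]
    have hd' : V.drop (k + 1 + 1) = d := h3.symm
    rw [PySem.List.pyRange_one_cons (by exact_mod_cast hk), List.foldl_cons]
    have e1 : PySem.List.pyGetD V ((k + 1 : Nat) : Int) 0 = v := by
      rw [PySem.List.pyGetD_natCast, hv]
    have e0 : ((k + 1 : Nat) : Int) - 1 = ((k : Nat) : Int) := by push_cast; ring
    have e2 : PySem.List.pyGetD V (((k + 1 : Nat) : Int) - 1) 0 = V.getD k 0 := by
      rw [e0, PySem.List.pyGetD_natCast]
    have e3 : ((k + 1 : Nat) : Int) + 1 = ((k + 1 + 1 : Nat) : Int) := by push_cast; ring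
    simp only [e1, e2, stepA]
    by_cases hcond : v = V.getD k 0 + 1
    · rw [if_pos ⟨by exact_mod_cast Nat.succ_pos k, hcond⟩, if_pos hcond,
          e3, ih (k + 1) _ hd', hv]
    · rw [if_neg (fun hh => hcond hh.2), if_neg hcond, e3, ih (k + 1) _ hd', hv]

-- ===== VERDICT (by name: the statement is the Claim_ definition above) =====

-- evaluate the first iteration of A's loop, then hand over to A_index / main_inv
theorem deleteAndEarn_spec : Claim_equal_deleteAndEarn := by
  intro nums _
  unfold Spec_deleteAndEarn deleteAndEarn deleteAndEarn_alt
  dsimp only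
  rw [PySem.Dict.keys_counter]
  cases hV : PySem.List.sorted (PySem.Set.ofList nums) (fun x => x) false with
  | nil =>
    rw [PySem.List.pyRange_one_eq_nil (by simp)]
    simp
  | cons v0 rest =>
    simp only []
    rw [PySem.List.pyRange_one_cons (by exact_mod_cast Nat.succ_pos rest.length),
        List.foldl_cons]
    rw [if_neg (fun h => lt_irrefl 0 h.1)]
    have hg0 : PySem.List.pyGetD (v0 :: rest) 0 0 = v0 := by
      simp
    rw [show ((0 : Int) + 1) = ((0 + 1 : Nat) : Int) by norm_num]
    rw [A_index (PySem.Dict.counter nums) (v0 :: rest) rest 0 _ rfl]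
    have hinv := main_inv (PySem.Dict.counter nums) rest [] v0 [] v0
    simp only [robRun_singleton] at hinv
    simp only [hg0, add_zero]
    have hT0 : runsTotal (PySem.Dict.counter nums) [] = 0 := rfl
    rw [hT0] at hinv
    simp only [zero_add] at hinv
    have hgd : (v0 :: rest).getD 0 0 = v0 := rfl
    rw [hgd, hinv]
    dsimp only
    rw [show runsTotal (PySem.Dict.counter nums)
          (List.foldl (fun s v => if v = s.2.2 + 1 then (s.1, s.2.1 ++ [v], v) else (s.1 ++ [s.2.1], [v], v))
            ([], [v0], v0) rest).1
        = (List.foldl (fun s v => if v = s.2.2 + 1 then (s.1, s.2.1 ++ [v], v) else (s.1 ++ [s.2.1], [v], v))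
            ([], [v0], v0) rest).1.foldl
            (fun acc run => acc + (robRun run (PySem.Dict.counter nums)).2) 0 from rfl]
    omega
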